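-- pv_equiv track=rewrite | github.com/wy51084915/YOLO-Crop | tools/test.py | get_geometric_series_weight
-- ===== SOURCE A (Python) =====
-- def get_geometric_series_weight(n):
--     def sum_of_geometric_series(r, length):
--         return (r ** length - 1) // (r - 1)
--
--     max_weight = 0
--     best_r = 0
--
--     # 二分法寻找公比
--     for r in range(2, n + 1):
--         low, high = 1, n
--         while low <= high:
--             mid = (low + high) // 2
--             if sum_of_geometric_series(r, mid) == n:
--                 if mid > max_weight:
--                     max_weight = mid
--                     best_r = r
--                 break
--             elif sum_of_geometric_series(r, mid) < n:
--                 low = mid + 1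
--             else:
--                 high = mid - 1
--
--     return max_weight, best_r
-- ===== SOURCE B (Python) =====
-- def get_geometric_series_weight(n):
--     # Same scan over ratios r, but the repunit sum is accumulated incrementally
--     # (s -> s*r + 1) with small integers instead of binary search over huge powers.
--     max_weight = 0
--     best_r = 0
--     for r in range(2, n + 1):
--         s, length = 1, 1
--         while s < n:
--             s = s * r + 1
--             length += 1
--         if s == n and length > max_weight:
--             max_weight = length
--             best_r = r
--     return max_weight, best_r
-- ===== Notes on version B (the rewrite author's own statement) =====
-- stated objective: faster
-- what changed: Per ratio r, the binary search over lengths that evaluates (r**mid - 1)//(r - 1) with huge big-int powers is replaced by incrementally accumulating the geometric sum s -> s*r + 1 until it reaches n.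
import Mathlib
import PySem

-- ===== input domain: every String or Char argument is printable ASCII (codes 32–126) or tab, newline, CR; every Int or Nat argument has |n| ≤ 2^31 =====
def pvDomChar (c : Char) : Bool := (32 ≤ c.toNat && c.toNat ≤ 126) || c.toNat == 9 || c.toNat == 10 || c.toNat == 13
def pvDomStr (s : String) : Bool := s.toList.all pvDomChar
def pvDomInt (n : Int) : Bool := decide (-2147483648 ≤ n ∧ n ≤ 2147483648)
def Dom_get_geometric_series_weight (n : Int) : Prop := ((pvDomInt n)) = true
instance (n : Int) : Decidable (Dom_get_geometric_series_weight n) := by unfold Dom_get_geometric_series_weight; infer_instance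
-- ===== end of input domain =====

-- B replaces A's per-ratio binary search over huge big-int powers (r ** mid - 1) // (r - 1)
-- by an incremental geometric accumulation s -> s*r + 1 with small integers (objective: faster).

-- ===== PORT A =====
-- Python helper: sum_of_geometric_series(r, length) = (r ** length - 1) // (r - 1)
def sum_of_geometric_series (r length : Int) : Int :=
  PySem.Int.floordiv (r ^ length.toNat - 1) (r - 1)

-- the inner `while low <= high` binary search; state (mw, br) = (max_weight, best_r)
def binSearchA (n r : Int) (low high mw br : Int) : Int × Int :=
  if h : low ≤ high then
    let mid := PySem.Int.floordiv (low + high) 2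
    if sum_of_geometric_series r mid = n then
      (if mid > mw then (mid, r) else (mw, br))
    else if sum_of_geometric_series r mid < n then
      binSearchA n r (mid + 1) high mw br
    else
      binSearchA n r low (mid - 1) mw br
  else (mw, br)
termination_by (high + 1 - low).toNat
decreasing_by
  · have := PySem.Int.floordiv_two_mid_bounds h
    omega
  · have := PySem.Int.floordiv_two_mid_bounds h
    omega

def get_geometric_series_weight (n : Int) : Int × Int :=
  (PySem.List.pyRange 2 (n + 1) 1).foldl
    (fun st r => binSearchA n r 1 n st.1 st.2) (0, 0)

-- ===== PORT B =====
-- the inner `while s < n: s = s * r + 1; length += 1` loop; returns the final (s, length).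
-- (the inner `if h : s < s * r + 1` is only a totality guard: in every call made by the
--  port, s ≥ 1 and r ≥ 2, so it always holds; Python's loop likewise always progresses.)
def accumLoopB (n r : Int) (s length : Int) : Int × Int :=
  if hs : s < n then
    if h : s < s * r + 1 then accumLoopB n r (s * r + 1) (length + 1)
    else (s, length)
  else (s, length)
termination_by (n - s).toNat

def get_geometric_series_weight_alt (n : Int) : Int × Int :=
  (PySem.List.pyRange 2 (n + 1) 1).foldl
    (fun st r =>
      let p := accumLoopB n r 1 1
      if p.1 = n ∧ p.2 > st.1 then (p.2, r) else st) (0, 0)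

-- ===== PRECONDITION & SPEC =====
def Spec_get_geometric_series_weight (n : Int) (out : Int × Int) : Prop := out = get_geometric_series_weight_alt n
instance (n : Int) (out : Int × Int) : Decidable (Spec_get_geometric_series_weight n out) := by unfold Spec_get_geometric_series_weight; infer_instance

-- ===== CLAIM (what is proved, stated in full; the proofs are below) =====
def Claim_equal_get_geometric_series_weight : Prop := ∀ (n : Int), Dom_get_geometric_series_weight n → Spec_get_geometric_series_weight n (get_geometric_series_weight n)

-- ===== LEMMAS AND PROOFS =====

-- gs r k = 1 + r + r^2 + … + r^(k-1), via B's recurrence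
def gs (r : Int) : Nat → Int
  | 0 => 0
  | k + 1 => gs r k * r + 1

lemma gs_nonneg (r : Int) (hr : 0 ≤ r) (k : Nat) : 0 ≤ gs r k := by
  induction k with
  | zero => simp [gs]
  | succ k ih => simp only [gs]; nlinarith

lemma gs_ge (r : Int) (hr : 1 ≤ r) (k : Nat) : (k : Int) ≤ gs r k := by
  induction k with
  | zero => simp [gs]
  | succ k ih =>
    have h0 := gs_nonneg r (by omega) k
    simp only [gs]
    push_cast
    nlinarith

lemma gs_lt_succ (r : Int) (hr : 1 ≤ r) (k : Nat) : gs r k < gs r (k + 1) := by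
  have h0 := gs_nonneg r (by omega) k
  simp only [gs]
  nlinarith

lemma gs_lt_gs (r : Int) (hr : 1 ≤ r) {a b : Nat} (hab : a < b) : gs r a < gs r b := by
  induction b with
  | zero => omega
  | succ b ih =>
    rcases Nat.lt_succ_iff_lt_or_eq.mp hab with h | h
    · exact lt_trans (ih h) (gs_lt_succ r hr b)
    · exact h ▸ gs_lt_succ r hr b

lemma gs_le_gs (r : Int) (hr : 1 ≤ r) {a b : Nat} (hab : a ≤ b) : gs r a ≤ gs r b := by
  rcases Nat.lt_or_ge a b with h | h
  · exact le_of_lt (gs_lt_gs r hr h)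
  · have : a = b := by omega
    simp [this]

-- A's closed formula (r ** L - 1) // (r - 1) computes gs r L.toNat, for any Int L
lemma sum_geo_eq_gs (r : Int) (hr : 2 ≤ r) (L : Int) :
    sum_of_geometric_series r L = gs r L.toNat := by
  have hmul : r ^ L.toNat - 1 = gs r L.toNat * (r - 1) := by
    induction L.toNat with
    | zero => simp [gs]
    | succ k ih => simp only [gs, pow_succ]; nlinarith
  unfold sum_of_geometric_series
  rw [hmul, PySem.Int.floordiv_eq_ediv_of_pos (by omega)]
  exact Int.mul_ediv_cancel _ (by omega)

-- binary search returns the unchanged state when no length in [low, high] hits n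
lemma binSearchA_none (n r : Int) :
    ∀ m low high mw br, (high + 1 - low).toNat = m →
      (∀ L : Int, low ≤ L → L ≤ high → sum_of_geometric_series r L ≠ n) →
      binSearchA n r low high mw br = (mw, br) := by
  intro m
  induction m using Nat.strong_induction_on with
  | _ m ih =>
    intro low high mw br hm hno
    rw [binSearchA]
    by_cases h : low ≤ high
    · have hmid := PySem.Int.floordiv_two_mid_bounds h
      simp only [h, dif_pos]
      have hne := hno _ hmid.1 hmid.2
      rw [if_neg hne]
      by_cases hlt : sum_of_geometric_series r (PySem.Int.floordiv (low + high) 2) < n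
      · rw [if_pos hlt]
        exact ih _ (by omega) _ _ _ _ rfl (fun L h1 h2 => hno L (by omega) h2)
      · rw [if_neg hlt]
        exact ih _ (by omega) _ _ _ _ rfl (fun L h1 h2 => hno L h1 (by omega))
    · simp [h]

-- binary search finds the (unique) hit when one exists in [low, high]
lemma binSearchA_found (n r : Int) (hr : 2 ≤ r) (L : Int) (hL1 : 1 ≤ L)
    (hsol : sum_of_geometric_series r L = n) :
    ∀ m low high mw br, (high + 1 - low).toNat = m →
      1 ≤ low → low ≤ L → L ≤ high →
      binSearchA n r low high mw br = (if mw < L then (L, r) else (mw, br)) := by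
  intro m
  induction m using Nat.strong_induction_on with
  | _ m ih =>
    intro low high mw br hm h1 h2 h3
    have h : low ≤ high := le_trans h2 h3
    have hmid := PySem.Int.floordiv_two_mid_bounds h
    set mid := PySem.Int.floordiv (low + high) 2 with hmiddef
    rw [binSearchA]
    simp only [h, dif_pos, ← hmiddef]
    by_cases heq : sum_of_geometric_series r mid = n
    · -- the hit is unique, so mid = L
      have hmidL : mid = L := by
        by_contra hne
        rcases lt_or_gt_of_ne hne with hlt | hgt
        · have := gs_lt_gs r (by omega) (a := mid.toNat) (b := L.toNat) (by omega)
          rw [← sum_geo_eq_gs r hr, ← sum_geo_eq_gs r hr, heq, hsol] at this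
          omega
        · have := gs_lt_gs r (by omega) (a := L.toNat) (b := mid.toNat) (by omega)
          rw [← sum_geo_eq_gs r hr, ← sum_geo_eq_gs r hr, heq, hsol] at this
          omega
      rw [if_pos heq, hmidL]
    · rw [if_neg heq]
      by_cases hlt : sum_of_geometric_series r mid < n
      · -- gs mid < gs L, so L lies strictly right of mid
        have hmidL : mid < L := by
          by_contra hge
          have := gs_le_gs r (by omega) (a := L.toNat) (b := mid.toNat) (by omega)
          rw [← sum_geo_eq_gs r hr, ← sum_geo_eq_gs r hr, hsol] at this
          omega
        rw [if_pos hlt]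
        exact ih _ (by omega) _ _ _ _ rfl (by omega) (by omega) h3
      · -- n < gs mid, so L lies strictly left of mid
        have hmidL : L < mid := by
          by_contra hge
          have := gs_le_gs r (by omega) (a := mid.toNat) (b := L.toNat) (by omega)
          rw [← sum_geo_eq_gs r hr, ← sum_geo_eq_gs r hr, hsol] at this
          omega
        rw [if_neg hlt]
        exact ih _ (by omega) _ _ _ _ rfl h1 h2 (by omega)

-- B's accumulation run from s = gs r k stops at the first m ≥ k with gs r m ≥ n
lemma accumLoopB_spec (n r : Int) (hr : 2 ≤ r) :
    ∀ (f k : Nat), 1 ≤ k → n ≤ gs r (k + f) →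
      ∃ m : Nat, k ≤ m ∧ n ≤ gs r m ∧ (∀ j, k ≤ j → j < m → gs r j < n) ∧
        accumLoopB n r (gs r k) (k : Int) = (gs r m, (m : Int)) := by
  intro f
  induction f with
  | zero =>
    intro k hk hn
    refine ⟨k, le_refl _, by simpa using hn, by omega, ?_⟩
    rw [accumLoopB]
    simp only [Nat.add_zero] at hn
    rw [dif_neg (by omega)]
  | succ f ihf =>
    intro k hk hn
    by_cases hs : gs r k < n
    · have hk1 : (1 : Int) ≤ gs r k := by
        have := gs_ge r (by omega) k
        omega
      have hguard : gs r k < gs r k * r + 1 := by nlinarith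
      have hstep : gs r k * r + 1 = gs r (k + 1) := by simp [gs]
      obtain ⟨m, hm1, hm2, hm3, hm4⟩ := ihf (k + 1) (by omega)
        (by rw [show k + 1 + f = k + (f + 1) by omega]; exact hn)
      refine ⟨m, by omega, hm2, ?_, ?_⟩
      · intro j hj1 hj2
        rcases Nat.eq_or_lt_of_le hj1 with h | h
        · exact h ▸ hs
        · exact hm3 j h hj2
      · rw [accumLoopB, dif_pos hs, dif_pos hguard, hstep]
        rw [show (k : Int) + 1 = ((k + 1 : Nat) : Int) by push_cast; ring]
        exact hm4
    · refine ⟨k, le_refl _, by omega, by omega, ?_⟩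
      rw [accumLoopB, dif_neg hs]

-- per-ratio step equality: A's binary search = B's accumulation + update
lemma step_eq (n r : Int) (hr : 2 ≤ r) (hrn : r ≤ n) (st : Int × Int) :
    binSearchA n r 1 n st.1 st.2 =
      (let p := accumLoopB n r 1 1
       if p.1 = n ∧ p.2 > st.1 then (p.2, r) else st) := by
  have hn : 2 ≤ n := le_trans hr hrn
  have hg1 : gs r 1 = 1 := by simp [gs]
  have hfuel : n ≤ gs r (1 + n.toNat) := by
    have := gs_ge r (by omega) (1 + n.toNat)
    push_cast at this
    omega
  obtain ⟨m, hm1, hm2, hm3, hm4⟩ := accumLoopB_spec n r hr n.toNat 1 (le_refl _) hfuel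
  rw [hg1] at hm4
  by_cases heq : gs r m = n
  · -- a repunit of ratio r hits n: both sides record length m when it improves
    have hmn : (m : Int) ≤ n := by
      have := gs_ge r (by omega) m
      omega
    have hsol : sum_of_geometric_series r (m : Int) = n := by
      rw [sum_geo_eq_gs r hr]
      simpa using heq
    rw [binSearchA_found n r hr (m : Int) (by exact_mod_cast hm1) hsol _ 1 n st.1 st.2 rfl
      (le_refl _) (by exact_mod_cast hm1) hmn]
    rw [Nat.cast_one] at hm4
    by_cases hmw : st.1 < (m : Int)
    · simp [hm4, heq, hmw]
    · simp [hm4, heq, hmw]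
  · -- no hit for this ratio: both sides leave the state unchanged
    rw [binSearchA_none n r _ 1 n st.1 st.2 rfl ?_]
    · rw [Nat.cast_one] at hm4
      simp [hm4, heq]
    · intro L hL1 hLn hcon
      rw [sum_geo_eq_gs r hr] at hcon
      rcases Nat.lt_or_ge L.toNat m with hlt | hge
      · have := hm3 L.toNat (by omega) hlt
        omega
      · have := gs_le_gs r (by omega) hge
        omega

-- ===== VERDICT (by name: the statement is the Claim_ definition above) =====
theorem get_geometric_series_weight_spec : Claim_equal_get_geometric_series_weight := by
  intro n _
  unfold Spec_get_geometric_series_weight get_geometric_series_weight get_geometric_series_weight_alt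
  apply PySem.List.foldl_congr_mem
  intro st r hmem
  have hb := PySem.List.mem_pyRange_one.mp hmem
  exact step_eq n r hb.1 (by omega) st
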